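-- pv_equiv track=rewrite | github.com/MuhamadZaki/Logika_Python | main.py | nested_sums
-- ===== SOURCE A (Python) =====
-- def nested_sums(services):
--     # Inisialisasi list kosong results untuk menyimpan angka-angka yang memenuhi kondisi
--     results = []
--     # Inisialisasi variabel totals untuk menghitung total dari semua angka di dalam nested list
--     totals = 0
--     # Melakukan iterasi melalui setiap elemen di dalam list services
--     for service in services:
--         # Melakukan iterasi melalui setiap elemen di dalam nested list yang sedang diiterasi
--         for subs in service:
--             # Memeriksa apakah elemen tersebut merupakan bilangan genap
--             if subs % 2 == 0:
--                 # Jika iya, tambahkan elemen tersebut ke dalam list results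
--                 results.append(subs)
--             # Menambahkan nilai elemen ke dalam total
--             totals += subs
--     # Mengembalikan list results dan total
--     return results, totals
-- ===== SOURCE B (Python) =====
-- def _dc_row(row, lo, hi):
--     # divide and conquer over row[lo:hi]
--     n = hi - lo
--     if n == 0:
--         return [], 0
--     if n == 1:
--         x = row[lo]
--         return ([x] if x % 2 == 0 else []), x
--     mid = (lo + hi) // 2
--     le, lt = _dc_row(row, lo, mid)
--     re, rt = _dc_row(row, mid, hi)
--     return le + re, lt + rt
--
--
-- def _dc_outer(services, lo, hi):
--     # divide and conquer over services[lo:hi]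
--     n = hi - lo
--     if n == 0:
--         return [], 0
--     if n == 1:
--         return _dc_row(services[lo], 0, len(services[lo]))
--     mid = (lo + hi) // 2
--     le, lt = _dc_outer(services, lo, mid)
--     re, rt = _dc_outer(services, mid, hi)
--     return le + re, lt + rt
--
--
-- def nested_sums(services):
--     return _dc_outer(services, 0, len(services))
-- ===== Notes on version B (the rewrite author's own statement) =====
-- stated objective: alternative
-- what changed: Replaces A's fused left-to-right nested loop with mutable accumulators by an index-based divide-and-conquer that recursively splits each range in half and combines the halves' (evens, sum) answers by concatenation and addition; correct because filtering distributes over concatenation and addition is associative.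
import Mathlib
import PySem

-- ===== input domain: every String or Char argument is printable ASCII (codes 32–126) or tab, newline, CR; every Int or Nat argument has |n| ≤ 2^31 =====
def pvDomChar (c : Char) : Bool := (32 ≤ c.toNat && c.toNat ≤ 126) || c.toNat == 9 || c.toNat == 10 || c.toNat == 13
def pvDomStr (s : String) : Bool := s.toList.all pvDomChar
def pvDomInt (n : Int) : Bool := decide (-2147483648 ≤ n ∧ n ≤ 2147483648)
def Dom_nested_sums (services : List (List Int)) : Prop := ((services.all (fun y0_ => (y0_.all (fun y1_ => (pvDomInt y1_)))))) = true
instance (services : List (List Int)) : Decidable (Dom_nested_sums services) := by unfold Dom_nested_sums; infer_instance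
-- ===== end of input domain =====

-- B replaces A's fused left-to-right nested loop by an index-based divide-and-conquer
-- that splits each range in half, solves the halves recursively and concatenates/adds
-- the partial answers: an alternative algorithm of the same cost.

-- ===== PORT A =====
def nested_sums (services : List (List Int)) : List Int × Int :=
  services.foldl
    (fun st service =>
      service.foldl
        (fun st subs =>
          let results := if PySem.Int.mod subs 2 = 0 then st.1 ++ [subs] else st.1
          (results, st.2 + subs))
        st)
    ([], 0)

-- ===== PORT B =====
-- _dc_row(row, lo, hi): divide and conquer over row[lo:hi].
-- row.getD lo 0 ports Python's row[lo]: every call site has lo < row.length (proved in dcRow_eq).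
def dcRow (row : List Int) (lo hi : Nat) : List Int × Int :=
  if hi - lo = 0 then ([], 0)
  else if hi - lo = 1 then
    let x := row.getD lo 0
    (if PySem.Int.mod x 2 = 0 then [x] else [], x)
  else
    let mid := (lo + hi) / 2
    let l := dcRow row lo mid
    let r := dcRow row mid hi
    (l.1 ++ r.1, l.2 + r.2)
termination_by hi - lo
decreasing_by all_goals omega

-- _dc_outer(services, lo, hi): divide and conquer over services[lo:hi].
def dcOuter (services : List (List Int)) (lo hi : Nat) : List Int × Int :=
  if hi - lo = 0 then ([], 0)
  else if hi - lo = 1 then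
    let row := services.getD lo []
    dcRow row 0 row.length
  else
    let mid := (lo + hi) / 2
    let l := dcOuter services lo mid
    let r := dcOuter services mid hi
    (l.1 ++ r.1, l.2 + r.2)
termination_by hi - lo
decreasing_by all_goals omega

def nested_sums_alt (services : List (List Int)) : List Int × Int :=
  dcOuter services 0 services.length

-- ===== PRECONDITION & SPEC =====
def Spec_nested_sums (services : List (List Int)) (out : List Int × Int) : Prop := out = nested_sums_alt services
instance (services : List (List Int)) (out : List Int × Int) : Decidable (Spec_nested_sums services out) := by unfold Spec_nested_sums; infer_instance

-- ===== CLAIM (what is proved, stated in full; the proofs are below) =====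
def Claim_equal_nested_sums : Prop := ∀ (services : List (List Int)), Dom_nested_sums services → Spec_nested_sums services (nested_sums services)

-- ===== LEMMAS AND PROOFS =====

-- A-side characterisation: the fused double loop computes (filter of the flattening, its sum).
theorem nested_sums_inner (l : List Int) (r : List Int) (t : Int) :
    l.foldl
      (fun st subs =>
        let results := if PySem.Int.mod subs 2 = 0 then st.1 ++ [subs] else st.1
        (results, st.2 + subs))
      (r, t)
    = (r ++ l.filter (fun x => PySem.Int.mod x 2 = 0), t + l.sum) := by
  induction l generalizing r t with
  | nil => simp
  | cons x xs ih =>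
    simp only [List.foldl_cons, List.filter_cons, List.sum_cons]
    by_cases h : PySem.Int.mod x 2 = 0
    · rw [if_pos h, ih]
      simp only [h, decide_true, if_true, List.append_assoc, List.singleton_append]
      ring_nf
    · rw [if_neg h, ih]
      simp only [h, decide_false, Bool.false_eq_true, if_false]
      ring_nf

theorem nested_sums_outer (services : List (List Int)) (r : List Int) (t : Int) :
    services.foldl
      (fun st service =>
        service.foldl
          (fun st subs =>
            let results := if PySem.Int.mod subs 2 = 0 then st.1 ++ [subs] else st.1
            (results, st.2 + subs))
          st)
      (r, t)
    = (r ++ (services.flatMap (fun s => s)).filter (fun x => PySem.Int.mod x 2 = 0),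
       t + (services.flatMap (fun s => s)).sum) := by
  induction services generalizing r t with
  | nil => simp
  | cons s ss ih =>
    simp only [List.foldl_cons, List.flatMap_cons, List.filter_append, List.sum_append]
    rw [nested_sums_inner, ih, List.append_assoc]
    ring_nf

-- the segment row[lo:hi]
def pvSeg (row : List Int) (lo hi : Nat) : List Int := (row.drop lo).take (hi - lo)

theorem pvSeg_split (row : List Int) (lo mid hi : Nat) (h1 : lo ≤ mid) (h2 : mid ≤ hi) :
    pvSeg row lo hi = pvSeg row lo mid ++ pvSeg row mid hi := by
  unfold pvSeg
  have : hi - lo = (mid - lo) + (hi - mid) := by omega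
  rw [this, List.take_add, List.drop_drop]
  have h3 : lo + (mid - lo) = mid := by omega
  rw [h3]

theorem pvSeg_one (row : List Int) (lo hi : Nat) (h0 : hi - lo = 1) (h2 : hi ≤ row.length) :
    pvSeg row lo hi = [row.getD lo 0] := by
  unfold pvSeg
  rw [h0]
  have hlo : lo < row.length := by omega
  rw [List.getD_eq_getElem _ _ hlo]
  rw [List.take_one, List.head?_drop, List.getElem?_eq_getElem hlo]
  rfl

-- B-side characterisation, row level.
theorem dcRow_eq (row : List Int) (lo hi : Nat) (h2 : hi ≤ row.length) :
    dcRow row lo hi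
      = ((pvSeg row lo hi).filter (fun x => PySem.Int.mod x 2 = 0), (pvSeg row lo hi).sum) := by
  induction lo, hi using dcRow.induct row with
  | case1 lo hi h0 =>
    unfold dcRow
    rw [if_pos h0]
    unfold pvSeg
    rw [h0]
    simp
  | case2 lo hi h0 h1 =>
    unfold dcRow
    rw [if_neg h0, if_pos h1, pvSeg_one row lo hi h1 h2]
    simp only [List.filter_cons, List.filter_nil, List.sum_cons, List.sum_nil, add_zero]
    by_cases h : PySem.Int.mod (row.getD lo 0) 2 = 0
    · simp only [h, decide_true, if_true]
    · simp only [h, decide_false, Bool.false_eq_true, if_false]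
  | case3 lo hi h0 h1 mid ih1 ih2 =>
    unfold dcRow
    rw [if_neg h0, if_neg h1]
    have hm1 : lo ≤ (lo + hi) / 2 := by omega
    have hm2 : (lo + hi) / 2 ≤ hi := by omega
    rw [pvSeg_split row lo ((lo + hi) / 2) hi hm1 hm2]
    simp only [List.filter_append, List.sum_append]
    rw [ih1 (by omega), ih2 h2]

-- segments of the outer list
def pvSegL (ss : List (List Int)) (lo hi : Nat) : List (List Int) := (ss.drop lo).take (hi - lo)

theorem pvSegL_split (ss : List (List Int)) (lo mid hi : Nat) (h1 : lo ≤ mid) (h2 : mid ≤ hi) :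
    pvSegL ss lo hi = pvSegL ss lo mid ++ pvSegL ss mid hi := by
  unfold pvSegL
  have : hi - lo = (mid - lo) + (hi - mid) := by omega
  rw [this, List.take_add, List.drop_drop]
  have h3 : lo + (mid - lo) = mid := by omega
  rw [h3]

theorem pvSegL_one (ss : List (List Int)) (lo hi : Nat) (h0 : hi - lo = 1) (h2 : hi ≤ ss.length) :
    pvSegL ss lo hi = [ss.getD lo []] := by
  unfold pvSegL
  rw [h0]
  have hlo : lo < ss.length := by omega
  rw [List.getD_eq_getElem _ _ hlo]
  rw [List.take_one, List.head?_drop, List.getElem?_eq_getElem hlo]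
  rfl

-- B-side characterisation, outer level.
theorem dcOuter_eq (ss : List (List Int)) (lo hi : Nat) (h2 : hi ≤ ss.length) :
    dcOuter ss lo hi
      = (((pvSegL ss lo hi).flatMap (fun s => s)).filter (fun x => PySem.Int.mod x 2 = 0),
         ((pvSegL ss lo hi).flatMap (fun s => s)).sum) := by
  induction lo, hi using dcOuter.induct ss with
  | case1 lo hi h0 =>
    unfold dcOuter
    rw [if_pos h0]
    unfold pvSegL
    rw [h0]
    simp
  | case2 lo hi h0 h1 =>
    unfold dcOuter
    rw [if_neg h0, if_pos h1, pvSegL_one ss lo hi h1 h2]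
    rw [dcRow_eq _ 0 _ (le_refl _)]
    unfold pvSeg
    simp
  | case3 lo hi h0 h1 mid ih1 ih2 =>
    unfold dcOuter
    rw [if_neg h0, if_neg h1]
    have hm1 : lo ≤ (lo + hi) / 2 := by omega
    have hm2 : (lo + hi) / 2 ≤ hi := by omega
    rw [pvSegL_split ss lo ((lo + hi) / 2) hi hm1 hm2]
    simp only [List.flatMap_append, List.filter_append, List.sum_append]
    rw [ih1 (by omega), ih2 h2]

-- ===== VERDICT (by name: the statement is the Claim_ definition above) =====
theorem nested_sums_spec : Claim_equal_nested_sums := by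
  intro services _
  show nested_sums services = nested_sums_alt services
  unfold nested_sums nested_sums_alt
  rw [nested_sums_outer, dcOuter_eq services 0 services.length (le_refl _)]
  unfold pvSegL
  simp
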